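-- pv_equiv track=rewrite | github.com/ilyaze/Codewars-tasks | Python/6 kyu/How many pages in a book.py | amount_of_pages
-- ===== SOURCE A (Python) =====
-- def amount_of_pages(summary):
--     pages = 0
--     page_num = 1
--     while summary > 0:
--         summary -= len(str(page_num))
--         pages += 1
--         page_num += 1
--     return pages
-- ===== SOURCE B (Python) =====
-- def amount_of_pages(summary):
--     # Skip whole digit-length blocks (9 one-digit pages, 90 two-digit pages, ...)
--     # instead of walking page by page; finish with a ceiling division.
--     if summary <= 0:
--         return 0
--     e = 0          # current digit length minus 1
--     pages = 0
--     while summary > 9 * 10 ** e * (e + 1):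
--         summary -= 9 * 10 ** e * (e + 1)
--         pages += 9 * 10 ** e
--         e += 1
--     return pages + -(-summary // (e + 1))
-- ===== Notes on version B (the rewrite author's own statement) =====
-- stated objective: faster
-- what changed: B subtracts whole digit-length block contributions (9*1, 90*2, 900*3, ...) and finishes with one ceiling division instead of A's page-by-page loop.
import Mathlib
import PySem

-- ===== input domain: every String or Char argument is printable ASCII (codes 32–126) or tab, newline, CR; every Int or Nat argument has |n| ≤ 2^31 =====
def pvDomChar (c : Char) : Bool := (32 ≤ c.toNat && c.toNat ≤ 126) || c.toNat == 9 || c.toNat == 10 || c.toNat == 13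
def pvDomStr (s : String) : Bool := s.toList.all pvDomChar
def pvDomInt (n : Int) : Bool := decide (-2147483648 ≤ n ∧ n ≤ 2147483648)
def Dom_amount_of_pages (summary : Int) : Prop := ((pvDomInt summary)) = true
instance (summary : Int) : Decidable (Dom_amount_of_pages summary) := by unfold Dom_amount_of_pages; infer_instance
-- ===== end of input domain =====

-- B replaces A's page-by-page digit subtraction with whole digit-length block
-- subtraction plus one ceiling division (objective: faster, asymptotic).

-- ===== PORT A =====

-- every str(n) is nonempty, so A's loop counter strictly decreases
-- (small term-style proofs only here: these lemmas sit inside the ports' definitions)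
theorem pvTDC_ne_nil : ∀ (f n : Nat) (l : List Char), l ≠ [] → Nat.toDigitsCore 10 f n l ≠ [] := by
  intro f
  induction f with
  | zero => intro n l h; exact h
  | succ f ih =>
      intro n l h
      simp only [Nat.toDigitsCore]
      split
      · exact List.cons_ne_nil _ _
      · exact ih _ _ (List.cons_ne_nil _ _)

theorem pvToDigits_ne_nil (m : Nat) : Nat.toDigits 10 m ≠ [] := by
  simp only [Nat.toDigits, Nat.toDigitsCore]
  split
  · exact List.cons_ne_nil _ _
  · exact pvTDC_ne_nil _ _ _ (List.cons_ne_nil _ _)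

theorem pvLenStr_pos (p : Int) : 1 ≤ PySem.Str.len (PySem.Int.toStr p) := by
  simp only [PySem.Str.len, PySem.Int.toList_toStr, PySem.Int.toChars]
  split
  · exact_mod_cast Nat.succ_le_succ (Nat.zero_le _)
  · exact_mod_cast List.length_pos_of_ne_nil (pvToDigits_ne_nil _)

-- termination measures for the two loops (named so the proof terms stay small)
theorem pvDecA (s L : Int) (hL : 1 ≤ L) (hs : 0 < s) : (s - L).toNat < s.toNat :=
  (Int.toNat_lt_toNat hs).mpr (sub_lt_self s (lt_of_lt_of_le one_pos hL))

theorem pvBlockPos (e : Nat) : (0 : Int) < 9 * 10 ^ e * (e + 1) :=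
  mul_pos (mul_pos (by norm_num) (pow_pos (by norm_num) e))
    (add_pos_of_nonneg_of_pos (Int.natCast_nonneg e) one_pos)

theorem pvDecB (s : Int) (e : Nat) (h : 9 * (10 : Int) ^ e * (e + 1) < s) :
    (s - 9 * 10 ^ e * (e + 1)).toNat < s.toNat :=
  (Int.toNat_lt_toNat (lt_trans (pvBlockPos e) h)).mpr (sub_lt_self s (pvBlockPos e))

-- the while loop of A: state (summary, page_num, pages)
def pagesLoopA (summary page_num pages : Int) : Int :=
  if h : 0 < summary then
    pagesLoopA (summary - PySem.Str.len (PySem.Int.toStr page_num)) (page_num + 1) (pages + 1)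
  else pages
termination_by summary.toNat
decreasing_by exact pvDecA summary _ (pvLenStr_pos page_num) h

def amount_of_pages (summary : Int) : Int :=
  pagesLoopA summary 1 0

-- ===== PORT B =====

-- the while loop of B: state (summary, e, pages); digit length is e + 1
def pagesLoopB (summary : Int) (e : Nat) (pages : Int) : Int :=
  if h : 9 * (10 : Int) ^ e * (e + 1) < summary then
    pagesLoopB (summary - 9 * 10 ^ e * (e + 1)) (e + 1) (pages + 9 * 10 ^ e)
  else pages + -(PySem.Int.floordiv (-summary) (e + 1))
termination_by summary.toNat
decreasing_by exact pvDecB summary e h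

def amount_of_pages_alt (summary : Int) : Int :=
  if summary ≤ 0 then 0 else pagesLoopB summary 0 0

-- ===== PRECONDITION & SPEC =====
def Spec_amount_of_pages (summary : Int) (out : Int) : Prop := out = amount_of_pages_alt summary
instance (summary : Int) (out : Int) : Decidable (Spec_amount_of_pages summary out) := by unfold Spec_amount_of_pages; infer_instance

-- ===== CLAIM (what is proved, stated in full; the proofs are below) =====
def Claim_equal_amount_of_pages : Prop := ∀ (summary : Int), Dom_amount_of_pages summary → Spec_amount_of_pages summary (amount_of_pages summary)

-- ===== LEMMAS AND PROOFS =====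

-- exact length of Nat.toDigits via Nat.log
theorem pvToDigitsCore_length (f : Nat) :
    ∀ n l, n < f → (Nat.toDigitsCore 10 f n l).length = l.length + Nat.log 10 n + 1 := by
  induction f with
  | zero => intro n l h; omega
  | succ f ih =>
      intro n l h
      by_cases h0 : n / 10 = 0
      · have hn : n < 10 := by omega
        have hlog : Nat.log 10 n = 0 := Nat.log_eq_zero_iff.mpr (Or.inl hn)
        simp [Nat.toDigitsCore, h0, hlog]
      · have hn : 10 ≤ n := by
          by_contra hc
          exact h0 (Nat.div_eq_of_lt (by omega))
        have hlt : n / 10 < f := by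
          have := Nat.div_lt_self (by omega : 0 < n) (by omega : 1 < 10)
          omega
        have hlog : Nat.log 10 (n / 10) = Nat.log 10 n - 1 := Nat.log_div_base 10 n
        have hpos : 1 ≤ Nat.log 10 n := by
          by_contra hc
          have h0' : Nat.log 10 n = 0 := by omega
          rcases Nat.log_eq_zero_iff.mp h0' with h' | h' <;> omega
        simp [Nat.toDigitsCore, h0, ih (n / 10) _ hlt]
        omega

theorem pvToDigits_length (n : Nat) : (Nat.toDigits 10 n).length = Nat.log 10 n + 1 := by
  have := pvToDigitsCore_length (n + 1) n [] (by omega)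
  simpa [Nat.toDigits] using this

-- pages in [10^e, 10^(e+1)) print with exactly e+1 digits
theorem pvDigitLen (e : Nat) (p : Int) (h1 : (10 : Int) ^ e ≤ p) (h2 : p < 10 ^ (e + 1)) :
    PySem.Str.len (PySem.Int.toStr p) = (e : Int) + 1 := by
  have hp : 0 < p := lt_of_lt_of_le (by positivity) h1
  simp only [PySem.Str.len, PySem.Int.toList_toStr, PySem.Int.toChars, if_neg (by omega : ¬ p < 0)]
  rw [pvToDigits_length]
  have h1' : 10 ^ e ≤ p.toNat := by
    have : ((10 ^ e : Nat) : Int) ≤ p := by push_cast; exact h1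
    omega
  have h2' : p.toNat < 10 ^ (e + 1) := by
    have : p < ((10 ^ (e + 1) : Nat) : Int) := by push_cast; exact h2
    omega
  have := Nat.log_eq_of_pow_le_of_lt_pow h1' h2'
  rw [this]
  push_cast
  ring

-- ceiling division facts, phrased for PySem.Int.floordiv
theorem pvCeil_base (r d : Int) (hd : 0 < d) (h1 : 0 < r) (h2 : r ≤ d) :
    -(PySem.Int.floordiv (-r) d) = 1 := by
  rw [PySem.Int.neg_floordiv_neg_eq_iff_of_pos hd]
  constructor <;> nlinarith

theorem pvCeil_step (r d : Int) (hd : 0 < d) (_h : d < r) :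
    -(PySem.Int.floordiv (-r) d) = -(PySem.Int.floordiv (-(r - d)) d) + 1 := by
  set q := -(PySem.Int.floordiv (-(r - d)) d) with hq
  have hqspec := (PySem.Int.neg_floordiv_neg_eq_iff_of_pos (a := r - d) hd).mp hq.symm
  rw [PySem.Int.neg_floordiv_neg_eq_iff_of_pos hd]
  constructor <;> nlinarith [hqspec.1, hqspec.2]

-- A's loop walks through a run of k consecutive pages of digit length e+1 that it
-- fully consumes (blockB) or inside which it stops, yielding a ceiling (blockA)
theorem pvBlockB (e : Nat) : ∀ (k : Nat) (p r acc : Int),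
    (10 : Int) ^ e ≤ p → p + k ≤ 10 ^ (e + 1) → (k : Int) * (e + 1) < r →
    pagesLoopA r p acc = pagesLoopA (r - k * (e + 1)) (p + k) (acc + k) := by
  intro k
  induction k with
  | zero => intro p r acc _ _ _; simp
  | succ k ih =>
      intro p r acc h1 h2 h3
      have he1 : (0 : Int) < (e : Int) + 1 := by positivity
      have hr : 0 < r := by nlinarith
      rw [pagesLoopA, dif_pos hr]
      rw [pvDigitLen e p h1 (by push_cast at h2 ⊢; omega)]
      have := ih (p + 1) (r - ((e : Int) + 1)) (acc + 1)
        (by omega) (by push_cast at h2 ⊢; omega) (by push_cast at h3 ⊢; nlinarith)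
      rw [this]
      congr 1 <;> push_cast <;> ring

theorem pvBlockA (e : Nat) : ∀ (k : Nat) (p r acc : Int),
    (10 : Int) ^ e ≤ p → p + k ≤ 10 ^ (e + 1) → 0 < r → r ≤ (k : Int) * (e + 1) →
    pagesLoopA r p acc = acc + -(PySem.Int.floordiv (-r) (e + 1)) := by
  intro k
  induction k with
  | zero => intro p r acc _ _ h3 h4; simp at h4; omega
  | succ k ih =>
      intro p r acc h1 h2 h3 h4
      have he1 : (0 : Int) < (e : Int) + 1 := by positivity
      rw [pagesLoopA, dif_pos h3]
      rw [pvDigitLen e p h1 (by push_cast at h2 ⊢; omega)]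
      by_cases hle : r ≤ (e : Int) + 1
      · rw [pagesLoopA, dif_neg (by omega)]
        rw [pvCeil_base r ((e : Int) + 1) he1 h3 hle]
      · push Not at hle
        rw [ih (p + 1) (r - ((e : Int) + 1)) (acc + 1)
          (by omega) (by push_cast at h2 ⊢; omega) (by omega)
          (by push_cast at h4 ⊢; nlinarith)]
        rw [pvCeil_step r ((e : Int) + 1) he1 hle]
        ring

-- the two loops agree: A started at page 10^e equals B started at digit index e
theorem pvMain : ∀ (m : Nat) (r : Int), r.toNat = m → ∀ (e : Nat) (acc : Int), 0 < r →
    pagesLoopA r ((10 : Int) ^ e) acc = pagesLoopB r e acc := by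
  intro m
  induction m using Nat.strong_induction_on with
  | _ m ih =>
      intro r hm e acc hr
      have hblock : (0 : Int) < 9 * (10 : Int) ^ e * ((e : Int) + 1) := by positivity
      rw [pagesLoopB]
      by_cases h : 9 * (10 : Int) ^ e * ((e : Int) + 1) < r
      · rw [dif_pos h]
        have hstep := pvBlockB e (9 * 10 ^ e) ((10 : Int) ^ e) r acc
          (le_refl _)
          (le_of_eq (by push_cast; rw [pow_succ]; ring))
          (by push_cast; exact h)
        rw [hstep]
        have hpe : (10 : Int) ^ e + ((9 * 10 ^ e : Nat) : Int) = 10 ^ (e + 1) := by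
          push_cast; rw [pow_succ]; ring
        rw [hpe]
        have hr' : 0 < r - 9 * (10 : Int) ^ e * ((e : Int) + 1) := by omega
        have hlt : (r - 9 * (10 : Int) ^ e * ((e : Int) + 1)).toNat < m := by
          have h1 : (1 : Int) ≤ 10 ^ e := one_le_pow₀ (by norm_num)
          have h9 : (9 : Int) ≤ 9 * (10 : Int) ^ e * ((e : Int) + 1) := by
            nlinarith [Int.natCast_nonneg e]
          omega
        have hind := ih _ hlt (r - 9 * (10 : Int) ^ e * ((e : Int) + 1)) rfl (e + 1)
          (acc + 9 * 10 ^ e) hr'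
        calc pagesLoopA (r - ((9 * 10 ^ e : Nat) : Int) * ((e : Int) + 1)) (10 ^ (e + 1))
               (acc + ((9 * 10 ^ e : Nat) : Int))
            = pagesLoopA (r - 9 * (10 : Int) ^ e * ((e : Int) + 1)) (10 ^ (e + 1))
               (acc + 9 * 10 ^ e) := by
                 have harg : r - ((9 * 10 ^ e : Nat) : Int) * ((e : Int) + 1)
                     = r - 9 * (10 : Int) ^ e * ((e : Int) + 1) := by push_cast; ring
                 have hacc : acc + ((9 * 10 ^ e : Nat) : Int) = acc + 9 * (10 : Int) ^ e := by
                   push_cast; ring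
                 rw [harg, hacc]
          _ = pagesLoopB (r - 9 * (10 : Int) ^ e * ((e : Int) + 1)) (e + 1)
               (acc + 9 * 10 ^ e) := hind
          _ = pagesLoopB (r - 9 * 10 ^ e * ((e : Int) + 1)) (e + 1) (acc + 9 * 10 ^ e) := rfl
      · rw [dif_neg h]
        push Not at h
        exact pvBlockA e (9 * 10 ^ e) ((10 : Int) ^ e) r acc
          (le_refl _)
          (le_of_eq (by push_cast; rw [pow_succ]; ring))
          hr
          (by push_cast; exact h)

-- ===== VERDICT (by name: the statement is the Claim_ definition above) =====
theorem amount_of_pages_spec : Claim_equal_amount_of_pages := by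
  intro summary _
  unfold Spec_amount_of_pages amount_of_pages amount_of_pages_alt
  by_cases h : summary ≤ 0
  · rw [if_pos h, pagesLoopA, dif_neg (by omega)]
  · rw [if_neg h]
    push Not at h
    have := pvMain summary.toNat summary rfl 0 0 h
    simpa using this
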